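-- pv_equiv track=rewrite | github.com/snakewizardd/dda_scaffold | simulations/simulate_coalition_flip.py | check_civility
-- ===== SOURCE A (Python) =====
-- WOUND_LEX = {
--     "derivative", "cliché", "cliche", "boring", "unoriginal", "pretentious",
--     "naive", "naïve", "shallow", "amateur", "pointless", "waste of time",
--     "hand-wavy", "handwavy", "unsubstantiated", "unsafe", "vague", "unclear",
--     "no evidence", "unsupported", "risky", "dangerous",
-- }
--
-- def check_civility(text: str) -> bool:
--     """Civility heuristic: consecutive caps streak."""
--     t_lower = text.lower()
--     wound_count = sum(1 for w in WOUND_LEX if w in t_lower)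
--     words = text.split()
--     max_streak = streak = 0
--     for w in words:
--         if len(w) > 2 and w.isupper():
--             streak += 1
--             max_streak = max(max_streak, streak)
--         else:
--             streak = 0
--     return wound_count < 2 and max_streak < 3
-- ===== SOURCE B (Python) =====
-- WOUND_LEX = {
--     "derivative", "cliché", "cliche", "boring", "unoriginal", "pretentious",
--     "naive", "naïve", "shallow", "amateur", "pointless", "waste of time",
--     "hand-wavy", "handwavy", "unsubstantiated", "unsafe", "vague", "unclear",
--     "no evidence", "unsupported", "risky", "dangerous",
-- }
--
-- def check_civility(text: str) -> bool:
--     """Civility heuristic: wound words and a 3-wide shouting window."""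
--     t = text.lower()
--     wounds = [w for w in WOUND_LEX if w in t]
--     qual = [len(w) > 2 and w.isupper() for w in text.split()]
--     shouty = any(a and b and c for a, b, c in zip(qual, qual[1:], qual[2:]))
--     return len(wounds) < 2 and not shouty
-- ===== Notes on version B (the rewrite author's own statement) =====
-- stated objective: alternative
-- what changed: The stateful running-streak counter with reset is replaced by a stateless 3-wide sliding window (zip of the qualifying-word mask with its two shifts), and the wound count by a filtered list; no accumulator state is carried.
import Mathlib
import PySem

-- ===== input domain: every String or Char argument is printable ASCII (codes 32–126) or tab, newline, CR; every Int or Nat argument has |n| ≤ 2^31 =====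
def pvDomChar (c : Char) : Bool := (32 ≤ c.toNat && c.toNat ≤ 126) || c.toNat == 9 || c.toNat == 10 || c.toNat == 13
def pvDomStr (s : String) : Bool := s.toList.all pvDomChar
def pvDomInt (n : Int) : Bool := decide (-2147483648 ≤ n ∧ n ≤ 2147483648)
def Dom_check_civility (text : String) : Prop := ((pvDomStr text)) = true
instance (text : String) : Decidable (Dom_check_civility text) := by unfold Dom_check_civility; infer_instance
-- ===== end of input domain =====

-- B replaces the stateful caps-streak counter by a stateless 3-wide sliding window and the
-- wound-word count by a filter; same O(n) cost (objective: alternative).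

-- ===== PORT A =====
-- the WOUND_LEX set literal, as a fixed list of its distinct elements (the loop below sums a
-- 0/1 indicator over the members, so Python's set-iteration order is irrelevant to the result)
def woundLex : List String :=
  ["derivative", "cliché", "cliche", "boring", "unoriginal", "pretentious",
   "naive", "naïve", "shallow", "amateur", "pointless", "waste of time",
   "hand-wavy", "handwavy", "unsubstantiated", "unsafe", "vague", "unclear",
   "no evidence", "unsupported", "risky", "dangerous"]

-- w.isupper(): hand port (PySem has only the Char form); exact on the ASCII domain, where the
-- cased characters are exactly the letters: some uppercase letter and no lowercase letter.
def pyStrIsupper (w : String) : Bool :=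
  w.toList.any (fun c => PySem.Str.isupper c) && w.toList.all (fun c => !(PySem.Str.islower c))

def check_civility (text : String) : Bool :=
  let tLower := PySem.Str.lower text
  let woundCount : Int :=
    woundLex.foldl (fun acc w => if PySem.Str.isIn w tLower then acc + 1 else acc) 0
  let words := PySem.Str.split₀ text
  let p : Int × Int :=
    words.foldl (fun (st : Int × Int) w =>
      if PySem.Str.len w > 2 && pyStrIsupper w then (max st.1 (st.2 + 1), st.2 + 1)
      else (st.1, 0)) (0, 0)
  decide (woundCount < 2) && decide (p.1 < 3)

-- ===== PORT B =====
def check_civility_alt (text : String) : Bool :=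
  let t := PySem.Str.lower text
  let wounds := woundLex.filter (fun w => PySem.Str.isIn w t)
  let qual := (PySem.Str.split₀ text).map (fun w => PySem.Str.len w > 2 && pyStrIsupper w)
  let shouty :=
    (List.zipWith3 (fun a b c => a && b && c) qual (qual.drop 1) (qual.drop 2)).any id
  decide (wounds.length < 2) && !shouty

-- ===== PRECONDITION & SPEC =====
def Spec_check_civility (text : String) (out : Bool) : Prop := out = check_civility_alt text
instance (text : String) (out : Bool) : Decidable (Spec_check_civility text out) := by unfold Spec_check_civility; infer_instance

-- ===== CLAIM (what is proved, stated in full; the proofs are below) =====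
def Claim_equal_check_civility : Prop := ∀ (text : String), Dom_check_civility text → Spec_check_civility text (check_civility text)

-- ===== LEMMAS AND PROOFS =====

-- B's sliding window, as a function of the qualifying mask
def gWin (q : List Bool) : Bool :=
  (List.zipWith3 (fun a b c => a && b && c) q (q.drop 1) (q.drop 2)).any id

-- A's streak test, re-expressed with a Nat carry (s = current streak)
def badB : Nat → List Bool → Bool
  | _, [] => false
  | s, b :: t => if b then decide (3 ≤ s + 1) || badB (s + 1) t else badB 0 t

theorem gWin_cons3 (a b c : Bool) (t : List Bool) :
    gWin (a :: b :: c :: t) = ((a && b && c) || gWin (b :: c :: t)) := by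
  simp [gWin, List.zipWith3]

theorem gWin_cons_false (t : List Bool) : gWin (false :: t) = gWin t := by
  match t with
  | [] => rfl
  | [x] => rfl
  | x :: y :: u => rw [gWin_cons3]; simp

theorem fold_fst_lt (q : List Bool) : ∀ (m s : Int), 0 ≤ s →
    ((q.foldl (fun (st : Int × Int) b =>
        if b then (max st.1 (st.2 + 1), st.2 + 1) else (st.1, 0)) (m, s)).1 < 3
      ↔ (m < 3 ∧ badB s.toNat q = false)) := by
  induction q with
  | nil => intro m s _; simp [badB]
  | cons b t ih =>
    intro m s hs
    cases b with
    | false =>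
      simpa [badB] using ih m 0 le_rfl
    | true =>
      have h1 : (0 : Int) ≤ s + 1 := by omega
      have := ih (max m (s + 1)) (s + 1) h1
      simp only [List.foldl_cons, if_true] at *
      rw [this]
      have htn : (s + 1).toNat = s.toNat + 1 := by omega
      by_cases h3 : s + 1 < 3
      · have : ¬ (3 ≤ s.toNat + 1) := by omega
        simp [badB, htn, this, h3]
      · have : (3 ≤ s.toNat + 1) := by omega
        simp [badB, htn, this]
        omega

theorem badB_eq_gWin (q : List Bool) : ∀ s : Nat, s ≤ 2 →
    badB s q = gWin (List.replicate s true ++ q) := by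
  induction q with
  | nil =>
    intro s hs
    interval_cases s <;> rfl
  | cons b t ih =>
    intro s hs
    cases b with
    | false =>
      have h0 := ih 0 (by omega)
      interval_cases s
      · simpa [badB, gWin_cons_false] using h0
      · -- gWin (true::false::t) = gWin t
        simp only [badB, if_neg (by simp : ¬ (false = true)), List.replicate, List.cons_append,
          List.nil_append]
        rw [h0]
        match t with
        | [] => rfl
        | x :: u => rw [gWin_cons3, gWin_cons_false]; simp
      · simp only [badB, if_neg (by simp : ¬ (false = true)), List.replicate, List.cons_append,
          List.nil_append]
        rw [h0]
        rw [gWin_cons3]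
        simp only [Bool.and_false, Bool.false_or]
        match t with
        | [] => rfl
        | x :: u => rw [gWin_cons3, gWin_cons_false]; simp
    | true =>
      have hrep : ∀ n : Nat, List.replicate n true ++ true :: t
          = List.replicate (n + 1) true ++ t := by
        intro n
        rw [List.replicate_succ']
        simp
      interval_cases s
      · simpa [badB, hrep 0] using ih 1 (by omega)
      · simpa [badB, hrep 1] using ih 2 (by omega)
      · rw [hrep 2]
        show badB 2 (true :: t) = gWin (true :: true :: true :: t)
        rw [gWin_cons3]
        simp [badB]

-- ===== VERDICT (by name: the statement is the Claim_ definition above) =====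
theorem check_civility_spec : Claim_equal_check_civility := by
  intro text _
  unfold Spec_check_civility check_civility check_civility_alt
  simp only []
  congr 1
  · -- wound count vs filter length
    rw [PySem.List.foldl_if_add_one (fun w => PySem.Str.isIn w (PySem.Str.lower text)) woundLex 0,
      List.countP_eq_length_filter]
    simp only [zero_add]
    rw [Bool.eq_iff_iff]
    simp only [decide_eq_true_eq]
    exact_mod_cast Iff.rfl
  · -- caps streak vs sliding window
    rw [← List.foldl_map (f := fun w => PySem.Str.len w > 2 && pyStrIsupper w)
      (g := fun (st : Int × Int) b =>
        if b then (max st.1 (st.2 + 1), st.2 + 1) else (st.1, 0))]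
    set q := (PySem.Str.split₀ text).map (fun w => PySem.Str.len w > 2 && pyStrIsupper w) with hq
    have h := fold_fst_lt q 0 0 le_rfl
    simp only [Int.toNat_zero] at h
    have hg := badB_eq_gWin q 0 (by omega)
    simp only [List.replicate, List.nil_append] at hg
    rw [Bool.eq_iff_iff]
    simp only [decide_eq_true_eq, Bool.not_eq_true']
    rw [h, hg]
    simp [gWin]
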